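/- GENERATED by farm/mkstatement.py from design/units.tsv (unit `vorbis_finish_frame.COMPOSITION`) and the Specs of Vorbis/Spec/*.lean — do not edit.
   THE STATEMENT of the proof unit `vorbis_finish_frame.COMPOSITION`: the function `vorbis_finish_frame` (141 instructions) satisfies its contract,
   GIVEN THE STATEMENTS OF ITS 5 SEGMENTS (`Vorbis.Spec.vorbis_finish_frame.Seg<k> Lay μ u₀`: what the unit `vorbis_finish_frame.<k>` proves).
   No machine code is walked: `ReachVia.trans` along the segments (the exit assertion of a segment is the entry assertion of
   its successor), an induction on the loop measures. What the names mean: Vorbis/Spec/Basic.lean. The theorem to prove: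
   `theorem vorbis_finish_frame_COMPOSITION_ok : Vorbis.Spec.vorbis_finish_frame_COMPOSITION.Statement`. -/
import Vorbis.Spec.FinishFrame
import Vorbis.Spec.Top
namespace Vorbis.Spec.vorbis_finish_frame_COMPOSITION
open X86 X86.User Asan

/-- The statement of unit `vorbis_finish_frame.COMPOSITION`. -/
def Statement : Prop :=
  ∀ (Lay : Layout) (_hLay : Lay.hi = 0x1000000) (μ : Microarch) (_hμ : UserX.MicroOK μ) (u₀ : State)
    (_h_vorbis_finish_frame_1 : Vorbis.Spec.vorbis_finish_frame.Seg1 Lay μ u₀)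
    (_h_vorbis_finish_frame_2 : Vorbis.Spec.vorbis_finish_frame.Seg2 Lay μ u₀)
    (_h_vorbis_finish_frame_3 : Vorbis.Spec.vorbis_finish_frame.Seg3 Lay μ u₀)
    (_h_vorbis_finish_frame_4 : Vorbis.Spec.vorbis_finish_frame.Seg4 Lay μ u₀)
    (_h_vorbis_finish_frame_5 : Vorbis.Spec.vorbis_finish_frame.Seg5 Lay μ u₀),
    ∀ (others : List Obj) (frames : List (Nat × FrameLayout)) (len : Nat) (A : Arena) (stored room : Int) (ysz : Nat → Nat), Calls Lay μ Vorbis.WayInv (Vorbis.conv u₀) Vorbis.L.vorbis_finish_frame.entry (Vorbis.Spec.vorbis_finish_frame.spec others frames len A stored room ysz)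

end Vorbis.Spec.vorbis_finish_frame_COMPOSITION
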